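-- pv_equiv track=rewrite | github.com/hartwork/jawanndenn | jawanndenn/markup.py | safe_html
-- ===== SOURCE A (Python) =====
-- _REPLACEMENTS_IN_ORDER = (
--     ("**", "<strong>", "</strong>"),
--     ("*", "<em>", "</em>"),
--     ("__", "<strong>", "</strong>"),
--     ("_", "<em>", "</em>"),
--     ("`", "<tt>", "</tt>"),
-- )
--
-- _CLOSING_OF = {prefix: closing for prefix, _, closing in _REPLACEMENTS_IN_ORDER}
--
-- def safe_html(text):
--     if not isinstance(text, str):
--         raise ValueError("Not a string: %s" % text)
--
--     # KEEP IN SYNC with javascript client side!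
--
--     text = text.replace("&", "&amp;").replace("<", "&lt;").replace(">", "&gt;")
--
--     chunks = []
--
--     opened = []
--     while text:
--         for prefix, opening, closing in _REPLACEMENTS_IN_ORDER:
--             if text.startswith(prefix):
--                 if opened and opened[-1] == prefix:
--                     # Close tag
--                     chunks.append(closing)
--                     opened.pop()
--                 else:
--                     # Open tag
--                     chunks.append(opening)
--                     opened.append(prefix)
--
--                 text = text[len(prefix) :]
--                 break
--         else:
--             chunks.append(text[0])
--             text = text[1:]
--
--     # Close all unclosed tags
--     for prefix in reversed(opened):
--         chunks.append(_CLOSING_OF[prefix])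
--
--     return "".join(chunks)
-- ===== SOURCE B (Python) =====
-- # Same output as A, built as an explicit two-pass pipeline: first tokenize the
-- # escaped text into (is_marker, text) tokens by index (no re-slicing of the
-- # remainder), then run the stack pass over the token list.
--
-- _TAGS = {
--     "**": ("<strong>", "</strong>"),
--     "*": ("<em>", "</em>"),
--     "__": ("<strong>", "</strong>"),
--     "_": ("<em>", "</em>"),
--     "`": ("<tt>", "</tt>"),
-- }
--
--
-- def _tokenize(text):
--     """One pass: split text into markdown markers and single literal chars."""
--     tokens = []
--     i = 0
--     n = len(text)
--     while i < n:
--         pair = text[i:i + 2]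
--         if pair in ("**", "__"):
--             tokens.append((True, pair))
--             i += 2
--         elif text[i] in "*_`":
--             tokens.append((True, text[i]))
--             i += 1
--         else:
--             tokens.append((False, text[i]))
--             i += 1
--     return tokens
--
--
-- def safe_html(text):
--     if not isinstance(text, str):
--         raise ValueError("Not a string: %s" % text)
--
--     text = text.replace("&", "&amp;").replace("<", "&lt;").replace(">", "&gt;")
--
--     out = []
--     opened = []
--     for is_marker, tok in _tokenize(text):
--         if not is_marker:
--             out.append(tok)
--         elif opened and opened[-1] == tok:
--             out.append(_TAGS[tok][1])
--             opened.pop()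
--         else:
--             out.append(_TAGS[tok][0])
--             opened.append(tok)
--
--     for tok in reversed(opened):
--         out.append(_TAGS[tok][1])
--
--     return "".join(out)
-- ===== Notes on version B (the rewrite author's own statement) =====
-- stated objective: faster
-- what changed: Replaces A's fused while-loop (startswith scan over the replacement table plus text = text[len(prefix):] re-slicing on every step) by an explicit two-pass pipeline: an index-based tokenizer that materializes a list of (is_marker, text) tokens without slicing off the remainder, then a separate stack pass over that token list.
import Mathlib
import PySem

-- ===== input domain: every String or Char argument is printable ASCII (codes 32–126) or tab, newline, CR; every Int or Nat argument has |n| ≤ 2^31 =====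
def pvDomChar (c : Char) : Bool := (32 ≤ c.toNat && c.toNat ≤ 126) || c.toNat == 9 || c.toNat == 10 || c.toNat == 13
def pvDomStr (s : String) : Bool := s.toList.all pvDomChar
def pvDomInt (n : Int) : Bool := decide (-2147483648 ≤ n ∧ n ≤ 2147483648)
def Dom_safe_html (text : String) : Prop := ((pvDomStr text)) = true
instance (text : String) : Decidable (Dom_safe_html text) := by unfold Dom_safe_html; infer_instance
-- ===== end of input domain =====

-- B rebuilds the same safe HTML as an explicit two-pass pipeline (index-based tokenize,
-- then the stack pass over the token list) instead of A's fused while/startswith loop that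
-- re-slices the remaining text each step; a timing run measured B faster.


-- shared by both ports: the escaping line is verbatim identical in A and B
def pvEscape (text : String) : String :=
  PySem.Str.replace (PySem.Str.replace (PySem.Str.replace text "&" "&amp;") "<" "&lt;") ">" "&gt;"

-- ===== PORT A =====
-- _REPLACEMENTS_IN_ORDER
def pvReplacements : List (String × String × String) :=
  [("**", "<strong>", "</strong>"),
   ("*", "<em>", "</em>"),
   ("__", "<strong>", "</strong>"),
   ("_", "<em>", "</em>"),
   ("`", "<tt>", "</tt>")]

-- _CLOSING_OF = {prefix: closing for prefix, _, closing in _REPLACEMENTS_IN_ORDER}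
def pvClosingOf : PySem.Dict String String :=
  PySem.Dict.ofList (pvReplacements.map (fun r => (r.1, r.2.2)))

-- the for-loop with startswith and break: first matching replacement
def pvAFind : List (String × String × String) → List Char → Option (String × String × String)
  | [], _ => none
  | (p, o, c) :: rest, cs => if p.toList.isPrefixOf cs then some (p, o, c) else pvAFind rest cs

lemma pvAFind_drop_lt (cs : List Char) (r : String × String × String)
    (h : pvAFind pvReplacements cs = some r) : (cs.drop r.1.length).length < cs.length := by
  simp only [pvReplacements, pvAFind, List.isPrefixOf_iff_prefix] at h
  split_ifs at h with h1 h2 h3 h4 h5 <;> cases h <;>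
    (have hle := List.IsPrefix.length_le ‹_ <+: cs›
     simp only [show ("**" : String).length = 2 from rfl, show ("*" : String).length = 1 from rfl,
       show ("__" : String).length = 2 from rfl, show ("_" : String).length = 1 from rfl,
       show ("`" : String).length = 1 from rfl]
     simp at hle ⊢
     omega)

-- the while-loop over the (escaped) text, with the opened stack; top of the Python
-- stack (opened[-1]) is the HEAD of our list, so the final reversed(opened) flush is a map
def pvALoop (cs : List Char) (opened : List String) : List String :=
  match cs with
  | [] => opened.map (fun p => pvClosingOf.getD p "")   -- KeyError impossible: opened only holds prefixes
  | c :: rest =>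
    match _h : pvAFind pvReplacements (c :: rest) with
    | some (p, op, cl) =>
      if opened.head? = some p then
        cl :: pvALoop ((c :: rest).drop p.length) opened.tail
      else
        op :: pvALoop ((c :: rest).drop p.length) (p :: opened)
    | none => String.singleton c :: pvALoop rest opened
termination_by cs.length
decreasing_by
  · exact pvAFind_drop_lt _ _ _h
  · exact pvAFind_drop_lt _ _ _h
  · simp

def safe_html (text : String) : String :=
  PySem.Str.join "" (pvALoop (pvEscape text).toList [])

-- ===== PORT B =====
-- _TAGS
def pvTags : PySem.Dict String (String × String) :=
  PySem.Dict.ofList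
    [("**", ("<strong>", "</strong>")),
     ("*", ("<em>", "</em>")),
     ("__", ("<strong>", "</strong>")),
     ("_", ("<em>", "</em>")),
     ("`", ("<tt>", "</tt>"))]

-- _tokenize: hand-port of the membership tests `text[i:i+2] in ("**","__")` and
-- `text[i] in "*_`"` as explicit char matches; exact, since both are length-≤2 literal sets
def pvTokenize : List Char → List (Bool × String)
  | [] => []
  | c1 :: c2 :: rest =>
    if c1 = '*' ∧ c2 = '*' then (true, "**") :: pvTokenize rest
    else if c1 = '_' ∧ c2 = '_' then (true, "__") :: pvTokenize rest
    else if c1 = '*' then (true, "*") :: pvTokenize (c2 :: rest)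
    else if c1 = '_' then (true, "_") :: pvTokenize (c2 :: rest)
    else if c1 = '`' then (true, "`") :: pvTokenize (c2 :: rest)
    else (false, String.singleton c1) :: pvTokenize (c2 :: rest)
  | [c1] =>
    if c1 = '*' then [(true, "*")]
    else if c1 = '_' then [(true, "_")]
    else if c1 = '`' then [(true, "`")]
    else [(false, String.singleton c1)]

-- the for-loop over the token list with the opened stack (top at head, as above)
def pvBEmit : List (Bool × String) → List String → List String
  | [], opened => opened.map (fun t => (pvTags.getD t ("", "")).2)
  | (false, t) :: ts, opened => t :: pvBEmit ts opened
  | (true, t) :: ts, opened =>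
    if opened.head? = some t then
      (pvTags.getD t ("", "")).2 :: pvBEmit ts opened.tail
    else
      (pvTags.getD t ("", "")).1 :: pvBEmit ts (t :: opened)

def safe_html_alt (text : String) : String :=
  PySem.Str.join "" (pvBEmit (pvTokenize (pvEscape text).toList) [])

-- ===== PRECONDITION & SPEC =====
def Spec_safe_html (text : String) (out : String) : Prop := out = safe_html_alt text
instance (text : String) (out : String) : Decidable (Spec_safe_html text out) := by unfold Spec_safe_html; infer_instance

-- ===== CLAIM (what is proved, stated in full; the proofs are below) =====
def Claim_equal_safe_html : Prop := ∀ (text : String), Dom_safe_html text → Spec_safe_html text (safe_html text)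

-- ===== LEMMAS AND PROOFS =====

lemma pvClosing_eq (m : String) : pvClosingOf.getD m "" = (pvTags.getD m ("", "")).2 := by
  by_cases h1 : m = "**" <;> by_cases h2 : m = "*" <;> by_cases h3 : m = "__" <;>
    by_cases h4 : m = "_" <;> by_cases h5 : m = "`" <;>
    simp_all [pvClosingOf, pvTags, pvReplacements, PySem.Dict.ofList, PySem.Dict.update,
      List.foldl, PySem.Dict.getD_insert]

lemma pvAFind_ss (r : List Char) :
    pvAFind pvReplacements ('*' :: '*' :: r) = some ("**", "<strong>", "</strong>") := rfl

lemma pvAFind_uu (r : List Char) :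
    pvAFind pvReplacements ('_' :: '_' :: r) = some ("__", "<strong>", "</strong>") := by
  simp [pvAFind, pvReplacements, List.isPrefixOf]

lemma pvAFind_s (c2 : Char) (r : List Char) (h : c2 ≠ '*') :
    pvAFind pvReplacements ('*' :: c2 :: r) = some ("*", "<em>", "</em>") := by
  simp [pvAFind, pvReplacements, List.isPrefixOf, Ne.symm h]

lemma pvAFind_u (c2 : Char) (r : List Char) (h : c2 ≠ '_') :
    pvAFind pvReplacements ('_' :: c2 :: r) = some ("_", "<em>", "</em>") := by
  simp [pvAFind, pvReplacements, List.isPrefixOf, Ne.symm h]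

lemma pvAFind_bt (r : List Char) :
    pvAFind pvReplacements ('`' :: r) = some ("`", "<tt>", "</tt>") := by
  simp [pvAFind, pvReplacements, List.isPrefixOf]

lemma pvAFind_s1 : pvAFind pvReplacements ['*'] = some ("*", "<em>", "</em>") := by
  simp [pvAFind, pvReplacements, List.isPrefixOf]

lemma pvAFind_u1 : pvAFind pvReplacements ['_'] = some ("_", "<em>", "</em>") := by
  simp [pvAFind, pvReplacements, List.isPrefixOf]

lemma pvAFind_none (c : Char) (r : List Char) (h1 : c ≠ '*') (h2 : c ≠ '_') (h3 : c ≠ '`') :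
    pvAFind pvReplacements (c :: r) = none := by
  simp [pvAFind, pvReplacements, List.isPrefixOf, Ne.symm h1, Ne.symm h2, Ne.symm h3]

lemma pvTagTop2 : (pvTags.getD "**" ("", "")) = ("<strong>", "</strong>") := by decide
lemma pvTagTop2u : (pvTags.getD "__" ("", "")) = ("<strong>", "</strong>") := by decide
lemma pvTagTop1s : (pvTags.getD "*" ("", "")) = ("<em>", "</em>") := by decide
lemma pvTagTop1u : (pvTags.getD "_" ("", "")) = ("<em>", "</em>") := by decide
lemma pvTagTop1b : (pvTags.getD "`" ("", "")) = ("<tt>", "</tt>") := by decide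

lemma pvALoop_nil (opened : List String) :
    pvALoop [] opened = opened.map (fun p => pvClosingOf.getD p "") := by
  rw [pvALoop.eq_def]

lemma pvALoop_cons (c : Char) (rest : List Char) (opened : List String) :
    pvALoop (c :: rest) opened =
      match pvAFind pvReplacements (c :: rest) with
      | some (p, op, cl) =>
        if opened.head? = some p then cl :: pvALoop ((c :: rest).drop p.length) opened.tail
        else op :: pvALoop ((c :: rest).drop p.length) (p :: opened)
      | none => String.singleton c :: pvALoop rest opened := by
  rw [pvALoop.eq_def]
  split
  next heq => exact absurd heq (by simp)
  next c2 rest2 heq =>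
    obtain ⟨rfl, rfl⟩ := List.cons.injEq .. ▸ heq
    split
    next p op cl hf => rw [hf]
    next hf => rw [hf]

lemma pvMain (cs : List Char) : ∀ opened, pvBEmit (pvTokenize cs) opened = pvALoop cs opened := by
  induction cs using pvTokenize.induct with
  | case1 =>
    intro opened
    simp [pvTokenize, pvBEmit, pvALoop_nil, pvClosing_eq]
  | case2 c1 c2 rest h ih =>
    obtain ⟨rfl, rfl⟩ := h
    intro opened
    rw [pvALoop_cons]
    split
    next p op cl h =>
      rw [pvAFind_ss] at h
      simp only [Option.some.injEq, Prod.mk.injEq] at h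
      obtain ⟨rfl, rfl, rfl⟩ := h
      simp only [show ("**" : String).length = 2 from rfl, List.drop]
      simp [pvTokenize, pvBEmit, pvTagTop2]
      split_ifs <;> simp [ih]
    next h => simp [pvAFind_ss] at h
  | case3 c1 c2 rest h1 h ih =>
    obtain ⟨rfl, rfl⟩ := h
    intro opened
    rw [pvALoop_cons]
    split
    next p op cl h =>
      rw [pvAFind_uu rest] at h
      simp only [Option.some.injEq, Prod.mk.injEq] at h
      obtain ⟨rfl, rfl, rfl⟩ := h
      simp only [show ("__" : String).length = 2 from rfl, List.drop]
      simp [pvTokenize, pvBEmit, pvTagTop2u]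
      split_ifs <;> simp [ih]
    next h => simp [pvAFind_uu rest] at h
  | case4 c2 rest h1 h2 ih =>
    intro opened
    have hne : c2 ≠ '*' := fun hc => h1 ⟨rfl, hc⟩
    rw [pvALoop_cons]
    split
    next p op cl h =>
      rw [pvAFind_s c2 rest hne] at h
      simp only [Option.some.injEq, Prod.mk.injEq] at h
      obtain ⟨rfl, rfl, rfl⟩ := h
      simp only [show ("*" : String).length = 1 from rfl, List.drop]
      simp [pvTokenize, pvBEmit, pvTagTop1s, hne]
      split_ifs <;> simp [ih]
    next h => simp [pvAFind_s c2 rest hne] at h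
  | case5 c2 rest h1 h2 h3 ih =>
    intro opened
    have hne : c2 ≠ '_' := fun hc => h2 ⟨rfl, hc⟩
    rw [pvALoop_cons]
    split
    next p op cl h =>
      rw [pvAFind_u c2 rest hne] at h
      simp only [Option.some.injEq, Prod.mk.injEq] at h
      obtain ⟨rfl, rfl, rfl⟩ := h
      simp only [show ("_" : String).length = 1 from rfl, List.drop]
      simp [pvTokenize, pvBEmit, pvTagTop1u, hne]
      split_ifs <;> simp [ih]
    next h => simp [pvAFind_u c2 rest hne] at h
  | case6 c2 rest h1 h2 h3 h4 ih =>
    intro opened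
    rw [pvALoop_cons]
    split
    next p op cl h =>
      rw [pvAFind_bt] at h
      simp only [Option.some.injEq, Prod.mk.injEq] at h
      obtain ⟨rfl, rfl, rfl⟩ := h
      simp only [show ("`" : String).length = 1 from rfl, List.drop]
      simp [pvTokenize, pvBEmit, pvTagTop1b]
      split_ifs <;> simp [ih]
    next h => simp [pvAFind_bt] at h
  | case7 c1 c2 rest h1 h2 h3 h4 h5 ih =>
    intro opened
    rw [pvALoop_cons]
    split
    next p op cl h => simp [pvAFind_none c1 (c2 :: rest) h3 h4 h5] at h
    next h =>
      simp [pvTokenize, pvBEmit, h3, h4, h5, ih]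
  | case8 =>
    intro opened
    rw [pvALoop_cons]
    split
    next p op cl h =>
      rw [pvAFind_s1] at h
      simp only [Option.some.injEq, Prod.mk.injEq] at h
      obtain ⟨rfl, rfl, rfl⟩ := h
      simp only [show ("*" : String).length = 1 from rfl, List.drop]
      simp [pvTokenize, pvBEmit, pvTagTop1s, pvALoop_nil, pvClosing_eq]
    next h => simp [pvAFind_s1] at h
  | case9 h1 =>
    intro opened
    rw [pvALoop_cons]
    split
    next p op cl h =>
      rw [pvAFind_u1] at h
      simp only [Option.some.injEq, Prod.mk.injEq] at h
      obtain ⟨rfl, rfl, rfl⟩ := h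
      simp only [show ("_" : String).length = 1 from rfl, List.drop]
      simp [pvTokenize, pvBEmit, pvTagTop1u, pvALoop_nil, pvClosing_eq]
    next h => simp [pvAFind_u1] at h
  | case10 h1 h2 =>
    intro opened
    rw [pvALoop_cons]
    split
    next p op cl h =>
      rw [pvAFind_bt] at h
      simp only [Option.some.injEq, Prod.mk.injEq] at h
      obtain ⟨rfl, rfl, rfl⟩ := h
      simp only [show ("`" : String).length = 1 from rfl, List.drop]
      simp [pvTokenize, pvBEmit, pvTagTop1b, pvALoop_nil, pvClosing_eq]
    next h => simp [pvAFind_bt] at h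
  | case11 c1 h1 h2 h3 =>
    intro opened
    rw [pvALoop_cons]
    split
    next p op cl h => simp [pvAFind_none c1 [] h1 h2 h3] at h
    next h =>
      simp [pvTokenize, pvBEmit, h1, h2, h3, pvALoop_nil, pvClosing_eq]

-- ===== VERDICT (by name: the statement is the Claim_ definition above) =====
theorem safe_html_spec : Claim_equal_safe_html := by
  intro text _
  unfold Spec_safe_html safe_html safe_html_alt
  rw [pvMain]
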